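-- pv_equiv track=rewrite | github.com/ActiveInferenceInstitute/cognitive | Things/KG_Multi_Agent/MKG_Multi_Agent/infer_queries_batch (plotly).py | fix_bracket_links
-- ===== SOURCE A (Python) =====
-- def fix_bracket_links(text: str) -> str:
--     """
--     Fix malformed bracket links in text by ensuring proper closure of [[ ]] pairs.
--     Rules:
--     1. When [[ is found, look for next ]] or [[
--     2. If ]] found first, continue to next [[
--     3. If [[ found first, close previous [[ with ]] before word boundary
--     4. Convert single brackets [text] to double brackets [[text]]
--     """
--     # First, convert single brackets to double brackets
--     # But we need to be careful not to affect existing double brackets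
--     i = 0
--     result = ""
--     while i < len(text):
--         if i + 1 < len(text) and text[i:i+2] == "[[":
--             # Skip over existing double-bracketed content
--             next_close = text.find("]]", i+2)
--             if next_close != -1:
--                 result += text[i:next_close+2]
--                 i = next_close + 2
--                 continue
--
--         if text[i] == "[" and (i == 0 or text[i-1:i+1] != "[["):
--             # Found a single opening bracket
--             # Look for matching single closing bracket
--             j = i + 1
--             while j < len(text):
--                 if text[j] == "]" and (j+1 >= len(text) or text[j:j+2] != "]]"):
--                     # Found matching single closing bracket
--                     # Convert [text] to [[text]]
--                     content = text[i+1:j]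
--                     result += "[[" + content + "]]"
--                     i = j + 1
--                     break
--                 j += 1
--             else:
--                 # No matching closing bracket found
--                 result += text[i]
--                 i += 1
--         else:
--             result += text[i]
--             i += 1
--
--     # Now handle any remaining malformed double brackets
--     text = result
--     result = ""
--     i = 0
--     while i < len(text):
--         # Look for opening brackets
--         if i + 1 < len(text) and text[i:i+2] == "[[":
--             # Find the start of the word after [[
--             word_start = i + 2
--             # Find the next [[ or ]]
--             next_open = text.find("[[", word_start)
--             next_close = text.find("]]", word_start)
--
--             # If no more closing brackets found, add ]] at next word boundary
--             if next_close == -1: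
--                 # Find next word boundary (space, punctuation, etc.)
--                 j = word_start
--                 while j < len(text) and text[j].isalnum():
--                     j += 1
--                 result += text[i:j] + "]]"
--                 i = j
--                 continue
--
--             # If next_open comes before next_close or no close found,
--             # close the current word
--             if next_open != -1 and (next_close == -1 or next_open < next_close):
--                 # Find the end of current word
--                 j = word_start
--                 while j < next_open and text[j].isalnum():
--                     j += 1
--                 result += text[i:j] + "]]"
--                 i = j
--             else:
--                 # Normal case: [[ ... ]] found
--                 result += text[i:next_close + 2]
--                 i = next_close + 2
--         else:
--             result += text[i]
--             i += 1
--
--     return result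
-- ===== SOURCE B (Python) =====
-- def fix_bracket_links(text: str) -> str:
--     return _pass2(_pass1(text))
--
--
-- def _pass1(t):
--     # convert single [x] to [[x]] (skipping well-formed [[..]]) by chunk surgery:
--     # repeatedly partition off the text before the next '[' and rewrite what follows.
--     out = []
--     prev_open = False  # is the char just before the current '[' itself a '['?
--     while True:
--         head, br, t = t.partition('[')
--         out.append(head)
--         if not br:
--             return ''.join(out)
--         if head:
--             prev_open = False
--         chunk = None
--         if t.startswith('['):
--             pre, sep, rest = t[1:].partition(']]')
--             if sep:
--                 chunk = (pre, rest)
--         if chunk is not None: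
--             out.append('[[' + chunk[0] + ']]')
--             t = rest
--             prev_open = False
--         elif not prev_open and ']' in t:
--             pre, _, post = t.partition(']')
--             m = len(post) - len(post.lstrip(']'))  # extend to the end of the ']' run
--             out.append('[[' + pre + ']' * m + ']]')
--             t = post[m:]
--             prev_open = False
--         else:
--             out.append('[')
--             prev_open = True
--
--
-- def _alnum_prefix(s):
--     m = 0
--     while m < len(s) and s[m].isalnum():
--         m += 1
--     return m
--
--
-- def _seg_fix(s):
--     # s is the text following one '[[' up to the next '[[' (exclusive)
--     if ']]' in s:
--         return '[[' + s
--     m = _alnum_prefix(s)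
--     return '[[' + s[:m] + ']]' + s[m:]
--
--
-- def _pass2(t):
--     # close unbalanced [[ : split the text on '[[' and fix each segment independently
--     segs = t.split('[[')
--     return segs[0] + ''.join(_seg_fix(s) for s in segs[1:])
-- ===== Notes on version B (the rewrite author's own statement) =====
-- stated objective: faster
-- what changed: B replaces A's index-cursor character walk (result += one char at a time, with find() rescans) by index-free string surgery: pass 1 repeatedly partition()s the text at the next opening bracket and rewrites the tail chunkwise (closing-run length via lstrip), and pass 2 becomes split on the double-open-bracket marker followed by an independent per-segment fix joined back once.
import Mathlib
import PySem

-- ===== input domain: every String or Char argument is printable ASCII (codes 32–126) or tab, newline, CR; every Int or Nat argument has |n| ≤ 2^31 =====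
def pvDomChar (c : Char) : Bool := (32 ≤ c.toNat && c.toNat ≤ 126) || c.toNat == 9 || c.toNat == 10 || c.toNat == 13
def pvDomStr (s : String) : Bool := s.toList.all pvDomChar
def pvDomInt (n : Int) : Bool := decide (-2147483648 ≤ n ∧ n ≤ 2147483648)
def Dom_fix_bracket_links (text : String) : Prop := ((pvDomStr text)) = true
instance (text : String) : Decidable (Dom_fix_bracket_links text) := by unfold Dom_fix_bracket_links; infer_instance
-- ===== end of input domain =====

-- B replaces A's per-character cursor walk by index-free chunkwise string surgery
-- (partition/split and a join at the end); a timing run measured B faster; the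
-- return value is proved identical on all strings.

-- ===== PORT A =====
-- str.find for a fixed 2-char needle (leftmost occurrence, none = -1); A calls text.find("]]")/("[[")
def pvFind2 (a b : Char) : List Char → Option Nat
  | [] => none
  | [_] => none
  | c :: d :: cs => if c = a ∧ d = b then some 0 else (pvFind2 a b (d :: cs)).map (· + 1)

-- A's inner j-loop of pass 1: first ']' that is not followed by another ']'
def pvScanClose : List Char → Option Nat
  | [] => none
  | [c] => if c = ']' then some 0 else none
  | c :: d :: cs => if c = ']' ∧ d ≠ ']' then some 0 else (pvScanClose (d :: cs)).map (· + 1)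

-- A's word-boundary loop: while j < len and text[j].isalnum()
def pvAlnumLen : List Char → Nat
  | [] => 0
  | c :: cs => if PySem.Chars.isalnum c then pvAlnumLen cs + 1 else 0

-- A's bounded word-boundary loop: while j < next_open and text[j].isalnum()
def pvAlnumLenB : Nat → List Char → Nat
  | _, [] => 0
  | bound, c :: cs =>
    if 0 < bound ∧ PySem.Chars.isalnum c then pvAlnumLenB (bound - 1) cs + 1 else 0

-- A, first while loop (single → double brackets); suffix recursion, prev = text[i-1] (none at i = 0)
def pvAPass1 (cs : List Char) (prev : Option Char) : List Char :=
  match cs with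
  | [] => []
  | c :: rest =>
    match (if c = '[' ∧ rest.head? = some '[' then pvFind2 ']' ']' rest.tail else none) with
    | some nc => (c :: rest).take (nc + 4) ++ pvAPass1 ((c :: rest).drop (nc + 4)) (some ']')
    | none =>
      if c = '[' ∧ prev ≠ some '[' then
        match pvScanClose rest with
        | some jr =>
            '[' :: '[' :: (rest.take jr ++ ']' :: ']' :: pvAPass1 (rest.drop (jr + 1)) (some ']'))
        | none => c :: pvAPass1 rest (some c)
      else c :: pvAPass1 rest (some c)
  termination_by cs.length
  decreasing_by all_goals (simp_all [List.length_drop]; try omega)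

-- A, second while loop (close malformed [[); suffix recursion
def pvAPass2 (cs : List Char) : List Char :=
  match cs with
  | [] => []
  | c :: rest =>
    if c = '[' ∧ rest.head? = some '[' then
      match pvFind2 ']' ']' rest.tail with
      | none =>
          let j := pvAlnumLen rest.tail
          '[' :: '[' :: (rest.tail.take j ++ ']' :: ']' :: pvAPass2 (rest.tail.drop j))
      | some nc =>
          match pvFind2 '[' '[' rest.tail with
          | some no =>
              if no < nc then
                let j := pvAlnumLenB no rest.tail
                '[' :: '[' :: (rest.tail.take j ++ ']' :: ']' :: pvAPass2 (rest.tail.drop j))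
              else
                '[' :: '[' :: (rest.tail.take (nc + 2) ++ pvAPass2 (rest.tail.drop (nc + 2)))
          | none =>
              '[' :: '[' :: (rest.tail.take (nc + 2) ++ pvAPass2 (rest.tail.drop (nc + 2)))
    else c :: pvAPass2 rest
  termination_by cs.length
  decreasing_by
    all_goals
      simp_all [List.length_drop]
      try omega

def fix_bracket_links (text : String) : String :=
  String.ofList (pvAPass2 (pvAPass1 text.toList none))

-- ===== PORT B =====
-- str.partition at a 1-char separator: (head, none) = separator absent, (head, some rest) = found
def pvPart1 (a : Char) : List Char → List Char × Option (List Char)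
  | [] => ([], none)
  | c :: cs =>
    if c = a then ([], some cs)
    else
      let p := pvPart1 a cs
      (c :: p.1, p.2)

-- str.partition at a 2-char separator
def pvPart2 (a b : Char) : List Char → List Char × Option (List Char)
  | [] => ([], none)
  | [c] => ([c], none)
  | c :: d :: cs =>
    if c = a ∧ d = b then ([], some cs)
    else
      let p := pvPart2 a b (d :: cs)
      (c :: p.1, p.2)

-- length of the leading run of a (len(post) - len(post.lstrip(a)))
def pvLead (a : Char) : List Char → Nat
  | [] => 0
  | c :: cs => if c = a then pvLead a cs + 1 else 0

-- B pass 1's chunk: if t starts with '[' and ']]' occurs after it, the (pre, rest) of that partition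
def pvChunk (t1 : List Char) : Option (List Char × List Char) :=
  if t1.head? = some '[' then
    match pvPart2 ']' ']' t1.tail with
    | (pre, some rest) => some (pre, rest)
    | (_, none) => none
  else none

theorem pvPart1_some_len {a : Char} {cs h r : List Char}
    (hp : pvPart1 a cs = (h, some r)) : r.length < cs.length := by
  induction cs generalizing h with
  | nil => simp [pvPart1] at hp
  | cons c cs ih =>
    by_cases hc : c = a
    · simp [pvPart1, hc] at hp
      simp [← hp.2]
    · simp [pvPart1, hc] at hp
      have := @ih (pvPart1 a cs).1 ?_
      · simpa using Nat.lt_succ_of_lt this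
      · rw [← hp.2]

theorem pvPart2_some_len {a b : Char} {cs h r : List Char}
    (hp : pvPart2 a b cs = (h, some r)) : r.length + 2 ≤ cs.length := by
  induction cs generalizing h with
  | nil => simp [pvPart2] at hp
  | cons c cs ih =>
    match cs, hp with
    | [], hp => simp [pvPart2] at hp
    | d :: cs', hp =>
      by_cases hc : c = a ∧ d = b
      · simp [pvPart2, hc] at hp
        simp [← hp.2]
      · simp [pvPart2, hc] at hp
        have := @ih (pvPart2 a b (d :: cs')).1 ?_
        · simp at this ⊢; omega
        · rw [← hp.2]

theorem pvChunk_some_len {t1 pre rest : List Char}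
    (hc : pvChunk t1 = some (pre, rest)) : rest.length < t1.length := by
  unfold pvChunk at hc
  split at hc
  · rename_i hh
    match t1, hh with
    | c :: t1', _ =>
      cases hp : pvPart2 ']' ']' t1' with
      | mk p o =>
        cases o with
        | none => simp [hp] at hc
        | some r =>
          simp [hp] at hc
          have := pvPart2_some_len hp
          simp [← hc.2]
          omega
  · simp at hc

-- B, _pass1: partition-driven loop, state prev_open = "char before this '[' is '['"
def pvBPass1 (t : List Char) (prevOpen : Bool) : List Char :=
  match h1 : pvPart1 '[' t with
  | (head, none) => head
  | (head, some t1) =>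
    let po := if head.isEmpty then prevOpen else false
    head ++
      (match h2 : pvChunk t1 with
       | some (pre, rest) => '[' :: '[' :: pre ++ ']' :: ']' :: pvBPass1 rest false
       | none =>
         if po = false ∧ t1.contains ']' then
           match h3 : pvPart1 ']' t1 with
           | (pre, some post) =>
             let m := pvLead ']' post
             '[' :: '[' :: pre ++ List.replicate m ']' ++ ']' :: ']' ::
               pvBPass1 (post.drop m) false
           | (_, none) => '[' :: pvBPass1 t1 true
         else '[' :: pvBPass1 t1 true)
  termination_by t.length
  decreasing_by
    all_goals
      first
      | exact lt_trans (pvChunk_some_len h2) (pvPart1_some_len h1)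
      | · have h4 := pvPart1_some_len h3
          have h5 := pvPart1_some_len h1
          have : (post.drop (pvLead ']' post)).length ≤ post.length := by
            simp [List.length_drop]
          omega
      | exact pvPart1_some_len h1

-- B, _pass2: t.split('[[') as a list of segments
def pvSegs (t : List Char) : List (List Char) :=
  match h : pvPart2 '[' '[' t with
  | (head, none) => [head]
  | (head, some rest) => head :: pvSegs rest
  termination_by t.length
  decreasing_by
    have := pvPart2_some_len h
    omega

-- B, _seg_fix: fix one segment (the text following one '[[')
def pvSegFix (s : List Char) : List Char :=
  if (pvPart2 ']' ']' s).2.isSome then '[' :: '[' :: s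
  else
    let m := pvAlnumLen s
    '[' :: '[' :: s.take m ++ ']' :: ']' :: s.drop m

def pvBPass2 (t : List Char) : List Char :=
  match pvSegs t with
  | [] => []
  | h :: rest => h ++ (rest.map pvSegFix).flatten

def fix_bracket_links_alt (text : String) : String :=
  String.ofList (pvBPass2 (pvBPass1 text.toList false))

-- ===== PRECONDITION & SPEC =====
def Spec_fix_bracket_links (text : String) (out : String) : Prop := out = fix_bracket_links_alt text
instance (text : String) (out : String) : Decidable (Spec_fix_bracket_links text out) := by unfold Spec_fix_bracket_links; infer_instance

-- ===== CLAIM =====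
def Claim_equal_fix_bracket_links : Prop := ∀ (text : String), Dom_fix_bracket_links text → Spec_fix_bracket_links text (fix_bracket_links text)

-- ===== LEMMAS AND PROOFS =====

-- proof-side helper: leftmost index of a single char (used to relate both ports' searches)
def pvFind1 (a : Char) : List Char → Option Nat
  | [] => none
  | c :: cs => if c = a then some 0 else (pvFind1 a cs).map (· + 1)

-- index of the first ']' run's last element, phrased through pvFind1/pvLead
def pvRunEnd (cs : List Char) : Option Nat :=
  match pvFind1 ']' cs with
  | none => none
  | some j => some (j + pvLead ']' (cs.drop (j + 1)))

theorem pvFind1_some_len {a : Char} {cs : List Char} {k : Nat}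
    (h : pvFind1 a cs = some k) : k < cs.length := by
  induction cs generalizing k with
  | nil => simp [pvFind1] at h
  | cons c cs ih =>
    by_cases hc : c = a
    · simp [pvFind1, hc] at h; simp; omega
    · simp [pvFind1, hc] at h
      obtain ⟨k', hk', rfl⟩ := h
      have := ih hk'; simp; omega

theorem pvFind2_some_len {a b : Char} {cs : List Char} {k : Nat}
    (h : pvFind2 a b cs = some k) : k + 2 ≤ cs.length := by
  induction cs generalizing k with
  | nil => simp [pvFind2] at h
  | cons c cs ih =>
    match cs, h with
    | [], h => simp [pvFind2] at h
    | d :: cs', h =>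
      by_cases hc : c = a ∧ d = b
      · simp [pvFind2, hc] at h; simp; omega
      · simp [pvFind2, hc] at h
        obtain ⟨k', hk', rfl⟩ := h
        have := @ih k' hk'
        simp at this ⊢; omega

theorem pvRunEnd_cons_ne {c : Char} (cs : List Char) (hc : ¬ c = ']') :
    pvRunEnd (c :: cs) = (pvRunEnd cs).map (· + 1) := by
  simp only [pvRunEnd, pvFind1, if_neg hc]
  cases h : pvFind1 ']' cs with
  | none => simp
  | some j => simp [List.drop_succ_cons]; omega

theorem scanClose_eq_runEnd : ∀ cs : List Char, pvScanClose cs = pvRunEnd cs := by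
  intro cs
  induction cs with
  | nil => simp [pvScanClose, pvRunEnd, pvFind1]
  | cons c rest ih =>
    match rest with
    | [] =>
      by_cases hc : c = ']' <;> simp [pvScanClose, pvRunEnd, pvFind1, hc, pvLead]
    | d :: rest' =>
      by_cases hc : c = ']'
      · by_cases hd : d = ']'
        · subst hc hd
          simp only [pvScanClose, pvRunEnd, pvFind1] at ih ⊢
          simp only [ne_eq, not_true_eq_false, and_false, if_false] at ih ⊢
          simp at ih
          rw [ih]
          simp [pvFind1, pvLead]
        · subst hc
          simp [pvScanClose, pvRunEnd, pvFind1, pvLead, hd]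
      · have hcc : ¬ (c = ']' ∧ ¬ d = ']') := fun ⟨h1, _⟩ => hc h1
        simp only [pvScanClose, if_neg hcc]
        rw [ih, pvRunEnd_cons_ne _ hc]

theorem pvFind1_some_drop {a : Char} {cs : List Char} {k : Nat}
    (h : pvFind1 a cs = some k) : ∃ r, cs.drop k = a :: r := by
  induction cs generalizing k with
  | nil => simp [pvFind1] at h
  | cons c cs ih =>
    by_cases hc : c = a
    · subst hc
      simp [pvFind1] at h
      exact ⟨cs, by simp [show k = 0 by omega]⟩
    · simp [pvFind1, hc] at h
      obtain ⟨k', hk', rfl⟩ := h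
      simpa using ih hk'

theorem pvFind2_some_drop {a b : Char} {cs : List Char} {k : Nat}
    (h : pvFind2 a b cs = some k) : ∃ r, cs.drop k = a :: b :: r := by
  induction cs generalizing k with
  | nil => simp [pvFind2] at h
  | cons c cs ih =>
    match cs, h with
    | [], h => simp [pvFind2] at h
    | d :: cs', h =>
      by_cases hc : c = a ∧ d = b
      · simp [pvFind2, hc] at h
        obtain ⟨hc, hd⟩ := hc
        subst hc hd
        exact ⟨cs', by simp [show k = 0 by omega]⟩
      · simp [pvFind2, hc] at h
        obtain ⟨k', hk', rfl⟩ := h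
        simpa using @ih k' hk'

-- A's pass-1 cursor copies every char up to the first '[' unchanged
theorem pass1_no_bracket {cs : List Char} (h : pvFind1 '[' cs = none) :
    ∀ prev, pvAPass1 cs prev = cs := by
  induction cs with
  | nil => intro prev; simp [pvAPass1]
  | cons c cs ih =>
    intro prev
    by_cases hc : c = '['
    · simp [pvFind1, hc] at h
    · simp [pvFind1, hc] at h
      rw [pvAPass1]
      simp [hc, ih h]

theorem pass1_copy_chunk {cs : List Char} {k : Nat} (h : pvFind1 '[' cs = some k) :
    ∀ prev, pvAPass1 cs prev =
      cs.take k ++ pvAPass1 (cs.drop k) (if k = 0 then prev else cs[k - 1]?) := by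
  induction cs generalizing k with
  | nil => simp [pvFind1] at h
  | cons c cs ih =>
    intro prev
    by_cases hc : c = '['
    · simp [pvFind1, hc] at h
      subst h
      simp
    · simp [pvFind1, hc] at h
      obtain ⟨k', hk', rfl⟩ := h
      rw [pvAPass1]
      simp only [hc, false_and, if_false]
      rw [ih hk' (some c)]
      rcases Nat.eq_zero_or_pos k' with hk0 | hk0
      · subst hk0; simp
      · obtain ⟨m, rfl⟩ : ∃ m, k' = m + 1 := ⟨k' - 1, by omega⟩
        simp

-- A's pass-2 cursor copies every char up to the first '[[' unchanged
theorem pass2_no_open {cs : List Char} (h : pvFind2 '[' '[' cs = none) :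
    pvAPass2 cs = cs := by
  induction cs with
  | nil => simp [pvAPass2]
  | cons c cs ih =>
    match cs, h with
    | [], h => rw [pvAPass2]; simp [pvAPass2]
    | d :: cs', h =>
      by_cases hc : c = '[' ∧ d = '['
      · simp [pvFind2, hc] at h
      · simp [pvFind2, hc] at h
        rw [pvAPass2]
        have hcc : ¬ (c = '[' ∧ (d :: cs').head? = some '[') := by
          simpa using hc
        rw [if_neg hcc, ih h]

theorem pass2_copy_chunk {cs : List Char} {k : Nat} (h : pvFind2 '[' '[' cs = some k) :
    pvAPass2 cs = cs.take k ++ pvAPass2 (cs.drop k) := by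
  induction cs generalizing k with
  | nil => simp [pvFind2] at h
  | cons c cs ih =>
    match cs, h with
    | [], h => simp [pvFind2] at h
    | d :: cs', h =>
      by_cases hc : c = '[' ∧ d = '['
      · simp [pvFind2, hc] at h
        simp [show k = 0 by omega]
      · simp [pvFind2, hc] at h
        obtain ⟨k', hk', rfl⟩ := h
        rw [pvAPass2]
        have hcc : ¬ (c = '[' ∧ (d :: cs').head? = some '[') := by
          simpa using hc
        rw [if_neg hcc, @ih k' hk']
        simp

-- the bounded word scan equals the unbounded one when the bound sits on a '['
theorem alnumLenB_eq {r : List Char} {no : Nat} {x : List Char}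
    (h : r.drop no = '[' :: x) : pvAlnumLenB no r = pvAlnumLen r := by
  induction r generalizing no x with
  | nil => simp at h
  | cons c r ih =>
    match no, h with
    | 0, h =>
      have hc : c = '[' := by simpa using congrArg List.head? h
      have : ¬ PySem.Chars.isalnum '[' = true := by decide
      simp [pvAlnumLenB, pvAlnumLen, hc, this]
    | n + 1, h =>
      simp only [List.drop_succ_cons] at h
      simp [pvAlnumLenB, pvAlnumLen]
      by_cases ha : PySem.Chars.isalnum c = true
      · simp [ha, ih h]
      · simp [ha]

-- ===== bridges between the partition/lead helpers of B and the find helpers =====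

theorem pvPart1_eq (a : Char) (cs : List Char) :
    pvPart1 a cs = match pvFind1 a cs with
      | none => (cs, none)
      | some k => (cs.take k, some (cs.drop (k + 1))) := by
  induction cs with
  | nil => simp [pvPart1, pvFind1]
  | cons c cs ih =>
    by_cases hc : c = a
    · simp [pvPart1, pvFind1, hc]
    · simp only [pvPart1, pvFind1, if_neg hc, ih]
      cases h : pvFind1 a cs <;> simp

theorem pvPart2_eq (a b : Char) (cs : List Char) :
    pvPart2 a b cs = match pvFind2 a b cs with
      | none => (cs, none)
      | some k => (cs.take k, some (cs.drop (k + 2))) := by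
  induction cs with
  | nil => simp [pvPart2, pvFind2]
  | cons c cs ih =>
    cases cs with
    | nil => simp [pvPart2, pvFind2]
    | cons d cs' =>
      by_cases hc : c = a ∧ d = b
      · simp [pvPart2, pvFind2, hc]
      · simp only [pvPart2, pvFind2, if_neg hc, ih]
        cases h : pvFind2 a b (d :: cs') <;> simp

theorem pvChunk_eq (t1 : List Char) :
    pvChunk t1 = match (if t1.head? = some '[' then pvFind2 ']' ']' t1.tail else none) with
      | some nc => some (t1.tail.take nc, t1.tail.drop (nc + 2))
      | none => none := by
  unfold pvChunk
  by_cases hh : t1.head? = some '['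
  · simp only [hh, if_true]
    rw [pvPart2_eq]
    cases pvFind2 ']' ']' t1.tail <;> simp
  · simp [hh]

theorem contains_find1 (a : Char) (cs : List Char) :
    cs.contains a = (pvFind1 a cs).isSome := by
  induction cs with
  | nil => simp [pvFind1]
  | cons c cs ih =>
    rw [List.contains_eq_mem] at ih
    by_cases hc : c = a
    · simp [pvFind1, hc]
    · have hac : ¬ a = c := fun h => hc h.symm
      simp [pvFind1, hc, hac, ih]

theorem pvFind1_getElem_ne {a : Char} {cs : List Char} {k i : Nat}
    (h : pvFind1 a cs = some k) (hi : i < k) : cs[i]? ≠ some a := by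
  induction cs generalizing k i with
  | nil => simp [pvFind1] at h
  | cons c cs ih =>
    by_cases hc : c = a
    · simp [pvFind1, hc] at h; omega
    · simp [pvFind1, hc] at h
      obtain ⟨k', hk', rfl⟩ := h
      cases i with
      | zero => simpa using hc
      | succ i => simpa using ih hk' (by omega)

theorem pvLead_take {a : Char} {cs : List Char} {m : Nat} (hm : m ≤ pvLead a cs) :
    cs.take m = List.replicate m a := by
  induction cs generalizing m with
  | nil => simp [pvLead] at hm; simp [show m = 0 by omega]
  | cons c cs ih =>
    by_cases hc : c = a
    · subst hc
      simp [pvLead] at hm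
      cases m with
      | zero => simp
      | succ m =>
        rw [List.take_succ_cons, List.replicate_succ]
        exact congrArg (c :: ·) (ih (by omega))
    · simp [pvLead, hc] at hm
      simp [show m = 0 by omega]

theorem pvFind2_tail_none {a b c : Char} {cs : List Char}
    (h : pvFind2 a b (c :: cs) = none) : pvFind2 a b cs = none := by
  cases cs with
  | nil => rfl
  | cons d cs' =>
    by_cases hc : c = a ∧ d = b
    · simp [pvFind2, hc] at h
    · simp [pvFind2, hc] at h
      exact h

theorem pvFind2_tail_some {a b c : Char} {cs : List Char} {n : Nat}
    (h : pvFind2 a b (c :: cs) = some (n + 1)) : pvFind2 a b cs = some n := by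
  cases cs with
  | nil => simp [pvFind2] at h
  | cons d cs' =>
    by_cases hc : c = a ∧ d = b
    · simp [pvFind2, hc] at h
    · simp only [pvFind2, if_neg hc] at h
      cases hx : pvFind2 a b (d :: cs') with
      | none => rw [hx] at h; simp at h
      | some k =>
        rw [hx] at h
        simp at h
        exact congrArg some h

theorem pvFind2_drop_none {a b : Char} {cs : List Char} (h : pvFind2 a b cs = none) :
    ∀ d, pvFind2 a b (cs.drop d) = none := by
  intro d
  induction d generalizing cs with
  | zero => simpa
  | succ d ih =>
    cases cs with
    | nil => simp [pvFind2]
    | cons c cs' =>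
      rw [List.drop_succ_cons]
      exact ih (pvFind2_tail_none h)

theorem pvFind2_drop_some {a b : Char} {cs : List Char} {n d : Nat}
    (h : pvFind2 a b cs = some n) (hd : d ≤ n) :
    pvFind2 a b (cs.drop d) = some (n - d) := by
  induction d generalizing cs n with
  | zero => simpa
  | succ d ih =>
    cases cs with
    | nil => simp [pvFind2] at h
    | cons c cs' =>
      rw [List.drop_succ_cons]
      obtain ⟨n', rfl⟩ : ∃ n', n = n' + 1 := ⟨n - 1, by omega⟩
      have := ih (pvFind2_tail_some h) (by omega)
      simpa [Nat.succ_sub_succ] using this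

theorem pvFind2_take_some {a b : Char} {cs : List Char} {n m : Nat}
    (h : pvFind2 a b cs = some n) (hm : n + 2 ≤ m) :
    pvFind2 a b (cs.take m) = some n := by
  induction cs generalizing n m with
  | nil => simp [pvFind2] at h
  | cons c cs ih =>
    cases cs with
    | nil => simp [pvFind2] at h
    | cons d cs' =>
      obtain ⟨m', rfl⟩ : ∃ m', m = m' + 1 := ⟨m - 1, by omega⟩
      rw [List.take_succ_cons]
      by_cases hc : c = a ∧ d = b
      · simp [pvFind2, hc] at h
        obtain ⟨m'', rfl⟩ : ∃ m'', m' = m'' + 1 := ⟨m' - 1, by omega⟩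
        rw [List.take_succ_cons]
        simp [pvFind2, hc, ← h]
      · simp [pvFind2, hc] at h
        obtain ⟨k, hk, rfl⟩ := h
        have hrec := ih hk (show k + 2 ≤ m' by omega)
        obtain ⟨m'', rfl⟩ : ∃ m'', m' = m'' + 1 := ⟨m' - 1, by omega⟩
        rw [List.take_succ_cons] at hrec
        simp [pvFind2, hc, hrec]

theorem pvFind2_take_none {a b : Char} {cs : List Char} {m : Nat}
    (h : ∀ n, pvFind2 a b cs = some n → m ≤ n + 1) :
    pvFind2 a b (cs.take m) = none := by
  induction cs generalizing m with
  | nil => simp [pvFind2]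
  | cons c cs ih =>
    cases cs with
    | nil =>
      cases m with
      | zero => simp [pvFind2]
      | succ m' => simp [pvFind2]
    | cons d cs' =>
      cases m with
      | zero => simp [pvFind2]
      | succ m' =>
        rw [List.take_succ_cons]
        by_cases hc : c = a ∧ d = b
        · have := h 0 (by simp [pvFind2, hc])
          have hm0 : m' = 0 := by omega
          subst hm0
          simp [pvFind2]
        · cases m' with
          | zero => simp [pvFind2]
          | succ m'' =>
            have h' : ∀ n, pvFind2 a b (d :: cs') = some n → m'' + 1 ≤ n + 1 := by
              intro n hn
              have := h (n + 1) (by simp [pvFind2, hc, hn])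
              omega
            have hrec := ih h'
            rw [List.take_succ_cons] at hrec
            rw [List.take_succ_cons]
            simp [pvFind2, hc, hrec]

theorem sep_lt {r : List Char} {nc no : Nat} (hc : pvFind2 ']' ']' r = some nc)
    (ho : pvFind2 '[' '[' r = some no) (h : nc < no) : nc + 2 ≤ no := by
  by_contra hn
  have hno : no = nc + 1 := by omega
  obtain ⟨x, hx⟩ := pvFind2_some_drop hc
  obtain ⟨y, hy⟩ := pvFind2_some_drop ho
  rw [hno] at hy
  have h1 : r.drop (nc + 1) = ']' :: x := by
    have := congrArg (List.drop 1) hx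
    rw [List.drop_drop] at this
    simpa using this
  rw [h1] at hy
  simp at hy

theorem sep_ne {r : List Char} {nc no : Nat} (hc : pvFind2 ']' ']' r = some nc)
    (ho : pvFind2 '[' '[' r = some no) : nc ≠ no := by
  intro hEq
  obtain ⟨x, hx⟩ := pvFind2_some_drop hc
  obtain ⟨y, hy⟩ := pvFind2_some_drop ho
  rw [hEq, hy] at hx
  simp at hx

theorem alnumLen_le_of_drop {cs x : List Char} {n : Nat} (h : cs.drop n = '[' :: x) :
    pvAlnumLen cs ≤ n := by
  induction n generalizing cs with
  | zero =>
    simp at h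
    subst h
    have : ¬ PySem.Chars.isalnum '[' = true := by decide
    simp [pvAlnumLen, this]
  | succ n ih =>
    cases cs with
    | nil => simp [pvAlnumLen]
    | cons c cs' =>
      rw [List.drop_succ_cons] at h
      have := ih h
      by_cases hac : PySem.Chars.isalnum c = true <;> simp [pvAlnumLen, hac] <;> omega

theorem alnumLen_take (cs : List Char) (m : Nat) :
    pvAlnumLen (cs.take m) = min (pvAlnumLen cs) m := by
  induction cs generalizing m with
  | nil => simp [pvAlnumLen]
  | cons c cs ih =>
    cases m with
    | zero => simp [pvAlnumLen]
    | succ m =>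
      rw [List.take_succ_cons]
      by_cases h : PySem.Chars.isalnum c = true
      · simp [pvAlnumLen, h, ih, Nat.succ_min_succ]
      · simp [pvAlnumLen, h]

theorem pvSegs_eq (t : List Char) :
    pvSegs t = match pvFind2 '[' '[' t with
      | none => [t]
      | some k => t.take k :: pvSegs (t.drop (k + 2)) := by
  rw [pvSegs.eq_def]
  split
  · rename_i head h1
    rw [pvPart2_eq] at h1
    cases hf : pvFind2 '[' '[' t with
    | none => rw [hf] at h1; simp at h1; simp [h1]
    | some k => rw [hf] at h1; simp at h1
  · rename_i head rest h1
    rw [pvPart2_eq] at h1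
    cases hf : pvFind2 '[' '[' t with
    | none => rw [hf] at h1; simp at h1
    | some k =>
      rw [hf] at h1
      simp at h1
      rw [← h1.1, ← h1.2]

theorem segFix_pos {s : List Char} {nc : Nat} (h : pvFind2 ']' ']' s = some nc) :
    pvSegFix s = '[' :: '[' :: s := by
  unfold pvSegFix
  rw [pvPart2_eq, h]
  simp

theorem segFix_neg {s : List Char} (h : pvFind2 ']' ']' s = none) :
    pvSegFix s = '[' :: '[' :: s.take (pvAlnumLen s) ++ ']' :: ']' :: s.drop (pvAlnumLen s) := by
  unfold pvSegFix
  rw [pvPart2_eq, h]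
  simp

-- ===== pass 1: A's cursor loop = B's partition loop =====

-- one step of A's pass-1 loop at a '[' cursor position
theorem pvAPass1_open (t1 : List Char) (p' : Option Char) :
    pvAPass1 ('[' :: t1) p' =
      match (if t1.head? = some '[' then pvFind2 ']' ']' t1.tail else none) with
      | some nc =>
          ('[' :: t1).take (nc + 4) ++ pvAPass1 (('[' :: t1).drop (nc + 4)) (some ']')
      | none =>
        if p' ≠ some '[' then
          match pvScanClose t1 with
          | some jr =>
              '[' :: '[' :: (t1.take jr ++ ']' :: ']' :: pvAPass1 (t1.drop (jr + 1)) (some ']'))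
          | none => '[' :: pvAPass1 t1 (some '[')
        else '[' :: pvAPass1 t1 (some '[') := by
  rw [pvAPass1]
  simp only [true_and]

theorem pass1_eq_aux : ∀ (n : Nat) (cs : List Char), cs.length ≤ n →
    ∀ prev : Option Char, pvAPass1 cs prev = pvBPass1 cs (decide (prev = some '[')) := by
  intro n
  induction n with
  | zero =>
    intro cs hlen prev
    have hnil : cs = [] := List.eq_nil_of_length_eq_zero (by omega)
    subst hnil
    simp [pvAPass1, pvBPass1, pvPart1]
  | succ n ih =>
    intro cs hlen prev
    rw [pvBPass1.eq_def]
    split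
    · rename_i head h1
      rw [pvPart1_eq] at h1
      cases hf : pvFind1 '[' cs with
      | none =>
        rw [hf] at h1
        simp at h1
        rw [pass1_no_bracket hf prev, h1]
      | some k => rw [hf] at h1; simp at h1
    · rename_i head t1 h1
      rw [pvPart1_eq] at h1
      cases hf : pvFind1 '[' cs with
      | none => rw [hf] at h1; simp at h1
      | some k =>
        rw [hf] at h1
        simp at h1
        obtain ⟨hhead, ht1⟩ := h1
        subst hhead
        subst ht1
        have hklen := pvFind1_some_len hf
        rw [pass1_copy_chunk hf prev]
        have hpo : (if (cs.take k).isEmpty then decide (prev = some '[') else false)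
            = decide ((if k = 0 then prev else cs[k - 1]?) = some '[') := by
          cases k with
          | zero => simp
          | succ k' =>
            have hne : (cs.take (k' + 1)).isEmpty = false := by
              cases cs with
              | nil => simp at hklen
              | cons c0 cs0 => rw [List.take_succ_cons]; rfl
            rw [hne]
            have := pvFind1_getElem_ne hf (Nat.lt_succ_self k')
            simp at this ⊢
            simpa using this
        rw [hpo]
        set p' := (if k = 0 then prev else cs[k - 1]?) with hp'
        congr 1
        obtain ⟨r0, hdk⟩ := pvFind1_some_drop hf
        have hr0 : r0 = cs.drop (k + 1) := by
          have := congrArg List.tail hdk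
          rw [List.tail_drop] at this
          simpa using this.symm
        subst hr0
        set t1 := cs.drop (k + 1) with hdef1
        have hlt1 : t1.length ≤ n := by
          simp [hdef1]
          omega
        rw [hdk, pvAPass1_open]
        split
        · rename_i nc hsc
          have hh : t1.head? = some '[' := by
            by_contra hcon
            rw [if_neg hcon] at hsc
            simp at hsc
          have hfc : pvFind2 ']' ']' t1.tail = some nc := by rwa [if_pos hh] at hsc
          have hchunk : pvChunk t1 = some (t1.tail.take nc, t1.tail.drop (nc + 2)) := by
            rw [pvChunk_eq, hsc]
          split
          · rename_i pre rest h2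
            rw [hchunk] at h2
            simp at h2
            obtain ⟨hpre, hrest⟩ := h2
            obtain ⟨t2, ht2⟩ : ∃ t2, t1 = '[' :: t2 := by
              cases hcs : t1 with
              | nil => rw [hcs] at hh; simp at hh
              | cons a as =>
                rw [hcs] at hh
                simp at hh
                exact ⟨as, by rw [hh]⟩
            rw [ht2] at hfc hlt1 hpre hrest
            simp only [List.tail_cons] at hfc hpre hrest
            obtain ⟨x, hx⟩ := pvFind2_some_drop hfc
            have htake : t2.take (nc + 2) = t2.take nc ++ [']', ']'] := by
              rw [List.take_add, hx]
              simp
            have hrec := ih (t2.drop (nc + 2)) (by simp at hlt1 ⊢; omega) (some ']')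
            simp only [show decide ((some ']' : Option Char) = some '[') = false by decide]
              at hrec
            rw [ht2]
            have h4 : ('[' :: '[' :: t2).take (nc + 4) = '[' :: '[' :: t2.take (nc + 2) := by
              simp [List.take_succ_cons, show nc + 4 = nc + 2 + 1 + 1 by omega]
            have h5 : ('[' :: '[' :: t2).drop (nc + 4) = t2.drop (nc + 2) := by
              simp [show nc + 4 = nc + 2 + 1 + 1 by omega]
            rw [h4, h5, htake, hrec, ← hpre, ← hrest]
            simp
          · rename_i h2
            rw [hchunk] at h2
            simp at h2
        · rename_i hsc
          have hchunk : pvChunk t1 = none := by rw [pvChunk_eq, hsc]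
          by_cases hp : p' = some '['
          · rw [if_neg (by simp [hp])]
            split
            · rename_i pre rest h2
              rw [hchunk] at h2
              simp at h2
            · rw [if_neg (by simp [hp])]
              rw [ih _ hlt1 (some '[')]
              simp
          · rw [if_pos hp, scanClose_eq_runEnd]
            split
            · rename_i jr hjr
              unfold pvRunEnd at hjr
              cases hj : pvFind1 ']' t1 with
              | none => rw [hj] at hjr; simp at hjr
              | some j =>
                rw [hj] at hjr
                simp at hjr
                have hcont : t1.contains ']' = true := by rw [contains_find1, hj]; rfl
                split
                · rename_i pre rest h2
                  rw [hchunk] at h2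
                  simp at h2
                · rw [if_pos ⟨by simpa using hp, hcont⟩]
                  have hpart : pvPart1 ']' t1 = (t1.take j, some (t1.drop (j + 1))) := by
                    rw [pvPart1_eq, hj]
                  split
                  · rename_i pre post h3
                    rw [hpart] at h3
                    simp at h3
                    obtain ⟨hpre, hpost⟩ := h3
                    set m := pvLead ']' post with hm
                    obtain ⟨r1, hr1⟩ := pvFind1_some_drop hj
                    have hr1' : r1 = t1.drop (j + 1) := by
                      have := congrArg List.tail hr1
                      rw [List.tail_drop] at this
                      simpa using this.symm
                    subst hr1'
                    have hmeq : pvLead ']' (t1.drop (j + 1)) = m := by rw [hm, hpost]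
                    have hjm : jr = j + m := by rw [hm, ← hpost]; omega
                    have hmle : m ≤ pvLead ']' (']' :: t1.drop (j + 1)) := by
                      simp [pvLead, hm, hpost]
                    have htj : t1.take (j + m) = t1.take j ++ List.replicate m ']' := by
                      rw [List.take_add, hr1]
                      exact congrArg _ (pvLead_take hmle)
                    have hdj : t1.drop (j + m + 1) = post.drop m := by
                      rw [← hpost]
                      have h9 : (t1.drop (j + 1)).drop m = t1.drop (j + 1 + m) := by
                        rw [List.drop_drop]
                      rw [h9, show j + 1 + m = j + m + 1 from by omega]
                    have hjlen := pvFind1_some_len hj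
                    have hplen : post.length ≤ t1.length - 1 := by
                      rw [← hpost]
                      simp
                      omega
                    have hrec := ih (post.drop m) (by simp; omega) (some ']')
                    simp only [show decide ((some ']' : Option Char) = some '[') = false
                      by decide] at hrec
                    rw [hjm, htj, hdj, hrec, ← hpre]
                    simp
                  · rename_i pre2 h3
                    rw [hpart] at h3
                    simp at h3
            · rename_i hjr
              unfold pvRunEnd at hjr
              cases hj : pvFind1 ']' t1 with
              | some j => rw [hj] at hjr; simp at hjr
              | none =>
                have hcont : t1.contains ']' = false := by rw [contains_find1, hj]; rfl
                split
                · rename_i pre rest h2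
                  rw [hchunk] at h2
                  simp at h2
                · have hnc : ¬ (decide (p' = some '[') = false ∧ t1.contains ']' = true) := by
                    rw [hcont]; simp
                  rw [if_neg hnc]
                  rw [ih _ hlt1 (some '[')]
                  simp

-- ===== pass 2: A's cursor loop = B's split/map/join =====

-- the word-closing step agrees with B's segment fix when the segment holds no ']]'
theorem open_alnum {r y : List Char} {no : Nat}
    (hfo : pvFind2 '[' '[' r = some no) (hy : r.drop no = '[' :: '[' :: y)
    (hseg : pvFind2 ']' ']' (r.take no) = none)
    (hIH : pvAPass2 (r.drop no) = ((pvSegs (r.drop (no + 2))).map pvSegFix).flatten) :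
    '[' :: '[' :: (r.take (pvAlnumLen r) ++ ']' :: ']' :: pvAPass2 (r.drop (pvAlnumLen r)))
      = pvSegFix (r.take no) ++ ((pvSegs (r.drop (no + 2))).map pvSegFix).flatten := by
  set m := pvAlnumLen r with hm
  have hmno : m ≤ no := alnumLen_le_of_drop (x := '[' :: y) hy
  rw [pass2_copy_chunk (pvFind2_drop_some hfo hmno)]
  rw [List.drop_drop, show m + (no - m) = no by omega, hy]
  rw [hy] at hIH
  rw [hIH]
  rw [segFix_neg hseg]
  rw [alnumLen_take, show min (pvAlnumLen r) no = m by omega]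
  rw [List.take_take, show min m no = m by omega]
  rw [List.drop_take]
  simp

theorem open_eq : ∀ (n : Nat) (r : List Char), r.length ≤ n →
    pvAPass2 ('[' :: '[' :: r) = ((pvSegs r).map pvSegFix).flatten := by
  intro n
  induction n with
  | zero =>
    intro r hlen
    have hnil : r = [] := List.eq_nil_of_length_eq_zero (by omega)
    subst hnil
    rw [pvAPass2]
    simp [pvFind2, pvAlnumLen, pvAPass2, pvSegs, pvPart2, pvSegFix]
  | succ n ih =>
    intro r hlen
    rw [pvAPass2]
    simp only [List.head?_cons, List.tail_cons, and_self, if_true, reduceIte]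
    rw [pvSegs_eq]
    cases hfo : pvFind2 '[' '[' r with
    | none =>
      simp only [hfo]
      cases hfc : pvFind2 ']' ']' r with
      | some nc =>
        simp only [hfc, hfo]
        rw [pass2_no_open (pvFind2_drop_none hfo (nc + 2))]
        simp only [List.map_cons, List.map_nil, List.flatten_cons, List.flatten_nil,
          List.append_nil]
        rw [segFix_pos hfc]
        simp
      | none =>
        simp only [hfc]
        rw [pass2_no_open (pvFind2_drop_none hfo _)]
        simp only [List.map_cons, List.map_nil, List.flatten_cons, List.flatten_nil,
          List.append_nil]
        rw [segFix_neg hfc]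
        simp
    | some no =>
      simp only [hfo]
      obtain ⟨y, hy⟩ := pvFind2_some_drop hfo
      have hy2 : y = r.drop (no + 2) := by
        have := congrArg (List.drop 2) hy
        rw [List.drop_drop] at this
        simpa [Nat.add_comm] using this.symm
      have hno2 := pvFind2_some_len hfo
      have hIH : pvAPass2 (r.drop no) = ((pvSegs (r.drop (no + 2))).map pvSegFix).flatten := by
        rw [hy, hy2]
        rw [hy2] at hy
        exact ih _ (by simp; omega)
      simp only [List.map_cons, List.flatten_cons]
      cases hfc : pvFind2 ']' ']' r with
      | some nc =>
        by_cases hlt : no < nc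
        · simp only [hfc, hfo, if_pos hlt]
          rw [alnumLenB_eq (x := '[' :: y) hy]
          exact open_alnum hfo hy
            (pvFind2_take_none (fun n' hn' => by
              rw [hfc] at hn'; injection hn' with hn'; omega)) hIH
        · have hlt2 : nc < no := by
            rcases Nat.lt_or_ge nc no with h | h
            · exact h
            · exfalso
              have := sep_ne hfc hfo
              omega
          have hsep : nc + 2 ≤ no := sep_lt hfc hfo hlt2
          simp only [hfc, hfo, if_neg hlt]
          rw [pass2_copy_chunk (pvFind2_drop_some hfo (by omega))]
          rw [List.drop_drop, show nc + 2 + (no - (nc + 2)) = no by omega]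
          rw [hIH]
          rw [segFix_pos (pvFind2_take_some hfc hsep)]
          rw [show r.take no = r.take (nc + 2) ++ (r.drop (nc + 2)).take (no - (nc + 2)) by
            rw [← List.take_add]; congr 1; omega]
          simp
      | none =>
        simp only [hfc, hfo]
        exact open_alnum hfo hy
          (pvFind2_take_none (fun n' hn' => by rw [hfc] at hn'; simp at hn')) hIH

theorem pass2_eq (cs : List Char) : pvAPass2 cs = pvBPass2 cs := by
  unfold pvBPass2
  rw [pvSegs_eq]
  cases hfo : pvFind2 '[' '[' cs with
  | none =>
    simp only [hfo]
    rw [pass2_no_open hfo]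
    simp
  | some k =>
    simp only [hfo]
    rw [pass2_copy_chunk hfo]
    obtain ⟨y, hy⟩ := pvFind2_some_drop hfo
    have hy2 : y = cs.drop (k + 2) := by
      have := congrArg (List.drop 2) hy
      rw [List.drop_drop] at this
      simpa [Nat.add_comm] using this.symm
    rw [hy, hy2, open_eq (cs.drop (k + 2)).length _ le_rfl]

-- ===== VERDICT =====
theorem fix_bracket_links_spec : Claim_equal_fix_bracket_links := by
  intro text _
  unfold Spec_fix_bracket_links fix_bracket_links fix_bracket_links_alt
  rw [pass1_eq_aux text.toList.length _ le_rfl none, pass2_eq]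
  simp
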